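-- pv_equiv track=rewrite | github.com/willwng/AoC2021 | _15/psol.py | add
-- ===== SOURCE A (Python) =====
-- def add(row, n):
--     new_row = [a for a in row]
--     for _ in range(n):
--         for i in range(len(new_row)):
--             new_row[i] += 1
--             if new_row[i] > 9:
--                 new_row[i] = 1
--     return new_row
-- ===== SOURCE B (Python) =====
-- def add(row, n):
--     # Closed form per element: after the first time a value exceeds 9 it cycles
--     # through 1..9, so the answer is a direct formula instead of n sweeps.
--     if n <= 0:
--         return list(row)
--     def final(a):
--         if a >= 9:
--             return (n - 1) % 9 + 1
--         if n <= 9 - a: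
--             return a + n
--         return (n + a - 10) % 9 + 1
--     return [final(a) for a in row]
-- ===== Notes on version B (the rewrite author's own statement) =====
-- stated objective: faster
-- what changed: Replaces the n-fold sweep over the list (incrementing each cell with 9->1 wraparound) by a per-element closed-form O(1) formula derived from the cycle structure, one pass over the list.
import Mathlib
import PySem

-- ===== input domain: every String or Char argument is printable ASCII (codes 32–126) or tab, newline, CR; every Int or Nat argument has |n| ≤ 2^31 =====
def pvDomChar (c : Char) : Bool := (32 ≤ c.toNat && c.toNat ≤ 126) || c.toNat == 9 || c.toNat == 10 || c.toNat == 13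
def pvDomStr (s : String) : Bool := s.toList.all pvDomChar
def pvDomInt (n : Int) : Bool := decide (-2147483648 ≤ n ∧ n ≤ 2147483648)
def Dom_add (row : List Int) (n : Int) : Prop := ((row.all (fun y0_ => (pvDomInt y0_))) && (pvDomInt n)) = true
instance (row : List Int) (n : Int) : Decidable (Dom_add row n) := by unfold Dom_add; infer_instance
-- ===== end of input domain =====

-- B replaces A's n full sweeps (increment with 9->1 wraparound) by a per-element closed-form formula; objective: faster (asymptotic).


-- ===== PORT A =====
def add (row : List Int) (n : Int) : List Int :=
  (PySem.List.pyRange 0 n 1).foldl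
    (fun r _ =>
      (PySem.List.pyRange 0 (r.length : Int) 1).foldl
        (fun r2 i =>
          let v := PySem.List.pyGetD r2 i 0 + 1
          PySem.List.pySetD r2 i (if v > 9 then 1 else v))
        r)
    (row.map (fun a => a))

-- ===== PORT B =====
def add_alt (row : List Int) (n : Int) : List Int :=
  if n ≤ 0 then row
  else row.map (fun a =>
    if a ≥ 9 then PySem.Int.mod (n - 1) 9 + 1
    else if n ≤ 9 - a then a + n
    else PySem.Int.mod (n + a - 10) 9 + 1)

-- ===== PRECONDITION & SPEC =====
def Spec_add (row : List Int) (n : Int) (out : List Int) : Prop := out = add_alt row n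
instance (row : List Int) (n : Int) (out : List Int) : Decidable (Spec_add row n out) := by unfold Spec_add; infer_instance

-- ===== CLAIM (what is proved, stated in full; the proofs are below) =====
def Claim_equal_add : Prop := ∀ (row : List Int) (n : Int), Dom_add row n → Spec_add row n (add row n)

-- ===== LEMMAS AND PROOFS =====

/-- One Python step on a single cell: increment, wrap 10 to 1. -/
def pvStep (a : Int) : Int := if a + 1 > 9 then 1 else a + 1

/-- B's closed form for one cell after k ≥ 1 steps (with `%` = emod, divisor 9 > 0). -/
def pvF (a : Int) (k : Int) : Int :=
  if a ≥ 9 then (k - 1) % 9 + 1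
  else if k ≤ 9 - a then a + k
  else (k + a - 10) % 9 + 1

/-- The inner `for i in range(len(r))` loop applies `pvStep` to every cell. -/
lemma inner_loop_eq (done rest : List Int) :
    (PySem.List.pyRange (done.length : Int) ((done.length + rest.length : Nat) : Int) 1).foldl
      (fun r2 i =>
        let v := PySem.List.pyGetD r2 i 0 + 1
        PySem.List.pySetD r2 i (if v > 9 then 1 else v))
      (done ++ rest)
    = done ++ rest.map pvStep := by
  induction rest generalizing done with
  | nil =>
      simp [PySem.List.pyRange_one_eq_nil]
  | cons x xs ih =>
      have hab : (done.length : Int) < ((done.length + (x :: xs).length : Nat) : Int) := by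
        simp only [List.length_cons]; push_cast; omega
      rw [PySem.List.pyRange_one_cons hab]
      simp only [List.foldl_cons]
      have hget : PySem.List.pyGetD (done ++ x :: xs) (done.length : Int) 0 = x := by
        simp [PySem.List.pyGetD_natCast, List.getD_eq_getElem?_getD]
      have hset : ∀ v : Int, PySem.List.pySetD (done ++ x :: xs) (done.length : Int) v
          = (done ++ [v]) ++ xs := by
        intro v
        simp [PySem.List.pySetD_natCast, List.set_append_right _ _ (Nat.le_refl done.length)]
      rw [hget, hset]
      have hlen : ((done ++ [pvStep x]).length : Int) = (done.length : Int) + 1 := by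
        simp
      have hlen2 : ((done ++ [pvStep x]).length + xs.length : Nat)
          = (done.length + (x :: xs).length : Nat) := by simp; omega
      have := ih (done ++ [pvStep x])
      rw [hlen, hlen2] at this
      simpa [pvStep] using this

/-- Folding a constant-body loop of length `l.length` is function iteration. -/
lemma foldl_const_iterate {α β : Type} (g : α → α) (l : List β) (init : α) :
    l.foldl (fun r _ => g r) init = g^[l.length] init := by
  induction l generalizing init with
  | nil => rfl
  | cons x xs ih => simp [List.foldl_cons, ih, Function.iterate_succ_apply]

lemma map_iterate (f : Int → Int) (k : Nat) (xs : List Int) :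
    (List.map f)^[k] xs = xs.map f^[k] := by
  induction k generalizing xs with
  | zero => simp
  | succ k ih => simp [Function.iterate_succ_apply, ih]

/-- Closed form for k ≥ 1 iterations of one cell. -/
lemma step_iterate (k : Nat) (hk : 1 ≤ k) (a : Int) :
    pvStep^[k] a = pvF a (k : Int) := by
  induction k generalizing a with
  | zero => omega
  | succ k ih =>
      by_cases hk1 : k = 0
      · subst hk1
        simp only [zero_add, Function.iterate_one, pvStep, pvF]
        norm_num
        split_ifs <;> omega
      · rw [Function.iterate_succ_apply, ih (by omega)]
        simp only [pvStep, pvF]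
        push_cast
        split_ifs <;> omega

theorem add_eq_alt (row : List Int) (n : Int) : add row n = add_alt row n := by
  by_cases hn : n ≤ 0
  · simp [add, add_alt, hn, PySem.List.pyRange_one_eq_nil hn]
  · have hbody : ∀ r : List Int,
        (PySem.List.pyRange 0 (r.length : Int) 1).foldl
          (fun r2 i =>
            let v := PySem.List.pyGetD r2 i 0 + 1
            PySem.List.pySetD r2 i (if v > 9 then 1 else v)) r
        = r.map pvStep := by
      intro r
      have := inner_loop_eq [] r
      simpa using this
    have hmapid : row.map (fun a => a) = row := by simp
    rw [add]
    simp only [hbody, hmapid]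
    rw [foldl_const_iterate (List.map pvStep) _ row,
        PySem.List.length_pyRange_one, map_iterate]
    have hk1 : 1 ≤ (n - 0).toNat := by omega
    have hcast : (((n - 0).toNat : Int)) = n := by omega
    rw [add_alt, if_neg hn]
    apply List.map_congr_left
    intro a _
    rw [step_iterate _ hk1 a, pvF, hcast]
    split_ifs <;> simp

-- ===== VERDICT (by name: the statement is the Claim_ definition above) =====
theorem add_spec : Claim_equal_add := by
  intro row n _
  unfold Spec_add
  exact add_eq_alt row n
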